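-- pv_equiv track=rewrite | github.com/KevinBeltran23/Mersenne_Twister_Break | MT19937.py | right_unmix
-- ===== SOURCE A (Python) =====
-- def right_unmix(value, shift):
--     result = value
--     w = 32
--
--     for i in range(0, w, shift):
--         # Work on the next shift sized portion at a time by generating a mask for it.
--         partial_mask = '0' * i + '1' * shift + '0' * (w - shift - i)
--         partial_mask = int(partial_mask[:w], 2)
--         portion = result & partial_mask
--
--         result ^= portion >> shift
--
--     return int(result)
-- ===== SOURCE B (Python) =====
-- def right_unmix(value, shift):
--     # Invert y = x ^ (x >> shift) on the low 32-bit window by shift doubling: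
--     # x ^= x >> s for s = shift, 2*shift, 4*shift, ... while s < 32.
--     # Bits at/above position 32 of value are untouched.
--     x = value & 0xFFFFFFFF
--     s = shift
--     while 0 < s < 32:
--         x ^= x >> s
--         s *= 2
--     return (value >> 32 << 32) | x
-- ===== Notes on version B (the rewrite author's own statement) =====
-- stated objective: faster
-- what changed: Replaces the chunk-by-chunk masked loop (which builds and parses a 32-character binary mask string per iteration) with the logarithmic doubling inverse x ^= x >> s, s = shift, 2*shift, 4*shift, ... on the low 32-bit window, ORing back the untouched high bits.
import Mathlib
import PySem

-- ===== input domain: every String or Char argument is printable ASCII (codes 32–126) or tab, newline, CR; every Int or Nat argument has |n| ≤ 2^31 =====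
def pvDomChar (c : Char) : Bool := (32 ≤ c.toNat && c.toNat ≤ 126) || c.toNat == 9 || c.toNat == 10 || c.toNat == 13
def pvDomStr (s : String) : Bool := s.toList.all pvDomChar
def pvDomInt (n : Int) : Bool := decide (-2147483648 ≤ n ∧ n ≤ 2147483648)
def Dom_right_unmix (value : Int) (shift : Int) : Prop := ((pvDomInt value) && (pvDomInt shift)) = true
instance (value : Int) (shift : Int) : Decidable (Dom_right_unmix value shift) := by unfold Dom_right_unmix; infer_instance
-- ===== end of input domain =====

-- B replaces A's per-chunk mask-string loop by the logarithmic doubling inverse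
-- x ^= x >> s (s = shift, 2*shift, ...) on the low 32-bit window, building and
-- parsing no mask strings (the intended speed-up; see the claim's timing label).


-- ===== PORT A =====
-- int(s, 2): in A the parsed string is always a nonempty string of '0'/'1' characters
-- (no sign, no whitespace, no base prefix), so this exact base-2 digit fold is
-- Python-exact on every string A ever parses.
def pvParseBin (cs : List Char) : Int :=
  cs.foldl (fun a c => 2 * a + (if c = '1' then 1 else 0)) 0

-- 'portion >> shift' uses shift.toNat: the loop body only runs when pyRange 0 32 shift
-- is nonempty, i.e. shift ≥ 1, where this is exact.
def right_unmix (value : Int) (shift : Int) : Int :=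
  (PySem.List.pyRange 0 32 shift).foldl (fun result i =>
    let pm : List Char :=
      List.replicate i.toNat '0' ++ List.replicate shift.toNat '1' ++
        List.replicate (32 - shift - i).toNat '0'
    let partial_mask : Int := pvParseBin (PySem.List.slice pm none (some 32))
    let portion : Int := PySem.Int.band result partial_mask
    PySem.Int.bxor result (portion >>> shift.toNat)) value

-- ===== PORT B =====
-- the 'while 0 < s < 32' loop of Source B ('x >> s' only evaluated under 0 < s)
def pvAltLoop (x : Int) (s : Int) : Int :=
  if h : 0 < s ∧ s < 32 then pvAltLoop (PySem.Int.bxor x (x >>> s.toNat)) (s * 2) else x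
termination_by (32 - s).toNat
decreasing_by omega

def right_unmix_alt (value : Int) (shift : Int) : Int :=
  let x : Int := PySem.Int.band value 4294967295
  PySem.Int.bor ((value >>> (32:Nat)) <<< (32:Nat)) (pvAltLoop x shift)

-- ===== PRECONDITION & SPEC =====
-- shift = 0 makes Python's range(0, 32, 0) raise ValueError; A returns on every other input.
def Pre_right_unmix (value : Int) (shift : Int) : Prop := shift ≠ 0
instance (value : Int) (shift : Int) : Decidable (Pre_right_unmix value shift) := by unfold Pre_right_unmix; infer_instance
def pvWitness_right_unmix : Int × Int := (123456, 7)

def Spec_right_unmix (value : Int) (shift : Int) (out : Int) : Prop := out = right_unmix_alt value shift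
instance (value : Int) (shift : Int) (out : Int) : Decidable (Spec_right_unmix value shift out) := by unfold Spec_right_unmix; infer_instance

-- ===== CLAIM (what is proved, stated in full; the proofs are below) =====
def Claim_equal_right_unmix : Prop := ∀ (value : Int) (shift : Int), Dom_right_unmix value shift → Pre_right_unmix value shift → Spec_right_unmix value shift (right_unmix value shift)

-- ===== LEMMAS AND PROOFS =====

-- ---------- Nat models of the two loops on the 32-bit window ----------

/-- The mask A uses at loop index `i` (bits [32 - min (i+s) 32, 32 - i)). -/
def pvAmask (i s : Nat) : Nat := 2 ^ (32 - i) - 2 ^ (32 - min (i + s) 32)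

/-- Bits [32 - min i 32, 32): the part of the window A has already recovered. -/
def pvTopm (i : Nat) : Nat := 2 ^ 32 - 2 ^ (32 - min i 32)

/-- Nat model of A's loop. -/
def pvALoop (s x i : Nat) : Nat :=
  if i < 32 then
    (if s = 0 then x else pvALoop s (x ^^^ ((x &&& pvAmask i s) >>> s)) (i + s))
  else x
termination_by 32 - i
decreasing_by omega

/-- Nat model of B's loop. -/
def pvBLoop (x s : Nat) : Nat :=
  if 0 < s ∧ s < 32 then pvBLoop (x ^^^ (x >>> s)) (2 * s) else x
termination_by 32 - s
decreasing_by omega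

def pvG (s x : Nat) : Nat := x ^^^ (x >>> s)

-- ---------- generic Nat bit lemmas ----------

theorem pv_distrib_add (a b : Nat) : a + b = (a ||| b) + (a &&& b) := by
  induction a using Nat.strong_induction_on generalizing b with
  | _ a ih =>
    rcases Nat.eq_zero_or_pos a with rfl | ha
    · simp
    · have h1 := Nat.div_add_mod a 2
      have h2 := Nat.div_add_mod b 2
      have h3 := Nat.div_add_mod (a ||| b) 2
      have h4 := Nat.div_add_mod (a &&& b) 2
      rw [Nat.or_div_two] at h3
      rw [Nat.and_div_two] at h4
      have hor := Nat.testBit_or a b 0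
      have hand := Nat.testBit_and a b 0
      simp only [Nat.testBit_zero] at hor hand
      rw [show ((decide (a % 2 = 1) || decide (b % 2 = 1))) = decide (a % 2 = 1 ∨ b % 2 = 1) by
        by_cases h : a % 2 = 1 <;> by_cases h2 : b % 2 = 1 <;> simp [h, h2]] at hor
      rw [show ((decide (a % 2 = 1) && decide (b % 2 = 1))) = decide (a % 2 = 1 ∧ b % 2 = 1) by
        by_cases h : a % 2 = 1 <;> by_cases h2 : b % 2 = 1 <;> simp [h, h2]] at hand
      rw [decide_eq_decide] at hor hand
      have ih2 := ih (a / 2) (by omega) (b / 2)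
      omega

theorem pv_tb_high {x j n : Nat} (hx : x < 2 ^ n) (hj : n ≤ j) : x.testBit j = false :=
  Nat.testBit_lt_two_pow (lt_of_lt_of_le hx (Nat.pow_le_pow_right (by norm_num) hj))

theorem pv_tb_mask {a b : Nat} (j : Nat) (h : b ≤ a) :
    (2 ^ a - 2 ^ b).testBit j = (decide (b ≤ j) && decide (j < a)) := by
  have e : 2 ^ a - 2 ^ b = 2 ^ b * (2 ^ (a - b) - 1) := by
    rw [Nat.mul_sub, Nat.mul_one, ← pow_add]
    congr 2
    omega
  rw [e, Nat.testBit_two_pow_mul, Nat.testBit_two_pow_sub_one]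
  by_cases h1 : b ≤ j
  · simp only [ge_iff_le, h1, decide_true, Bool.true_and]
    rw [decide_eq_decide]
    omega
  · simp [h1]

theorem pv_subxor {x y : Nat} (h : x &&& y = y) : x - y = x ^^^ y := by
  have h1 : (x ^^^ y) &&& y = 0 := by
    apply Nat.eq_of_testBit_eq
    intro i
    have hc := congrArg (fun z => z.testBit i) h
    simp only [Nat.testBit_and] at hc
    simp only [Nat.testBit_and, Nat.testBit_xor, Nat.zero_testBit]
    cases hy : y.testBit i <;> simp [hy] at hc ⊢ <;> simp [hc]
  have h2 : (x ^^^ y) ||| y = x := by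
    apply Nat.eq_of_testBit_eq
    intro i
    have hc := congrArg (fun z => z.testBit i) h
    simp only [Nat.testBit_and] at hc
    simp only [Nat.testBit_or, Nat.testBit_xor]
    cases hy : y.testBit i <;> simp [hy] at hc ⊢
    simp [hc]
  have h3 := pv_distrib_add (x ^^^ y) y
  rw [h1, h2] at h3
  omega

theorem pv_ldiffxor {m y n : Nat} (hm : m < 2 ^ n) :
    m - (m &&& y) = m &&& (y ^^^ (2 ^ n - 1)) := by
  have hsub : m &&& (m &&& y) = m &&& y := by rw [← Nat.and_assoc, Nat.and_self]
  rw [pv_subxor hsub]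
  apply Nat.eq_of_testBit_eq
  intro j
  simp only [Nat.testBit_and, Nat.testBit_xor, Nat.testBit_two_pow_sub_one]
  by_cases hj : j < n
  · cases hx : m.testBit j <;> cases hy : y.testBit j <;> simp [hj]
  · have := pv_tb_high hm (by omega : n ≤ j)
    simp [this]

theorem pv_sr_lt {x a s : Nat} (hx : x < 2 ^ a) (hs : s ≤ a) : x >>> s < 2 ^ (a - s) := by
  rw [Nat.shiftRight_eq_div_pow]
  rw [Nat.div_lt_iff_lt_mul (Nat.two_pow_pos s)]
  calc x < 2 ^ a := hx
    _ = 2 ^ (a - s) * 2 ^ s := by rw [← pow_add]; congr 1; omega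

theorem pv_sr_zero {x a s : Nat} (hx : x < 2 ^ a) (hs : a ≤ s) : x >>> s = 0 := by
  rw [Nat.shiftRight_eq_div_pow]
  exact Nat.div_eq_of_lt (lt_of_lt_of_le hx (Nat.pow_le_pow_right (by norm_num) hs))

theorem pv_disj_and {x d a b : Nat} (hd : d < 2 ^ b) (hb : b ≤ a) :
    (x ^^^ d) &&& (2 ^ a - 2 ^ b) = x &&& (2 ^ a - 2 ^ b) := by
  apply Nat.eq_of_testBit_eq
  intro j
  simp only [Nat.testBit_and, Nat.testBit_xor, pv_tb_mask j hb]
  by_cases hj : b ≤ j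
  · have : d.testBit j = false := pv_tb_high hd hj
    simp [this]
  · simp [hj]

theorem pv_m1 {i s : Nat} (hi : i < 32) : pvTopm i ^^^ pvAmask i s = pvTopm (i + s) := by
  have e1 : min i 32 = i := by omega
  have hb1 : 32 - min (i + s) 32 ≤ 32 - i := by omega
  apply Nat.eq_of_testBit_eq
  intro j
  simp only [pvTopm, pvAmask, e1, Nat.testBit_xor,
    pv_tb_mask j (show 32 - i ≤ 32 by omega), pv_tb_mask j hb1,
    pv_tb_mask j (show 32 - min (i + s) 32 ≤ 32 by omega)]
  by_cases h1 : 32 - i ≤ j <;> by_cases h2 : j < 32 <;>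
    by_cases h3 : 32 - min (i + s) 32 ≤ j <;> by_cases h4 : j < 32 - i <;>
    simp [h1, h2, h3, h4] <;> omega

-- ---------- B's loop inverts the tempering ----------

theorem pv_g_comm (a b x : Nat) : pvG a (pvG b x) = pvG b (pvG a x) := by
  simp only [pvG, Nat.shiftRight_xor_distrib, ← Nat.shiftRight_add]
  rw [Nat.add_comm b a]
  simp [Nat.xor_assoc, Nat.xor_left_comm, Nat.xor_comm]

theorem pv_g_g (s x : Nat) : pvG s (pvG s x) = x ^^^ (x >>> (s + s)) := by
  simp only [pvG, Nat.shiftRight_xor_distrib, ← Nat.shiftRight_add]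
  simp [Nat.xor_assoc, Nat.xor_left_comm, Nat.xor_comm]

theorem pv_bloop_comm (t : Nat) : ∀ (n s x : Nat), 32 - s ≤ n →
    pvBLoop (pvG t x) s = pvG t (pvBLoop x s) := by
  intro n
  induction n with
  | zero =>
    intro s x h
    rw [pvBLoop, if_neg (by omega), pvBLoop, if_neg (by omega)]
  | succ n ih =>
    intro s x h
    by_cases hg : 0 < s ∧ s < 32
    · rw [pvBLoop, if_pos hg, show pvG t x ^^^ pvG t x >>> s = pvG s (pvG t x) from rfl,
        pv_g_comm s t, ih (2 * s) _ (by omega)]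
      conv_rhs => rw [pvBLoop, if_pos hg]
      rfl
    · rw [pvBLoop, if_neg hg, pvBLoop, if_neg hg]

theorem pv_bloop_lt : ∀ (n s x : Nat), 32 - s ≤ n → x < 2 ^ 32 → pvBLoop x s < 2 ^ 32 := by
  intro n
  induction n with
  | zero =>
    intro s x h hx
    rw [pvBLoop, if_neg (by omega)]
    exact hx
  | succ n ih =>
    intro s x h hx
    by_cases hg : 0 < s ∧ s < 32
    · rw [pvBLoop, if_pos hg]
      exact ih (2 * s) _ (by omega)
        (Nat.xor_lt_two_pow hx (lt_of_le_of_lt (Nat.shiftRight_le x s) hx))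
    · rw [pvBLoop, if_neg hg]; exact hx

theorem pv_bloop_inv : ∀ (n s x : Nat), 32 - s ≤ n → 0 < s → x < 2 ^ 32 →
    pvG s (pvBLoop x s) = x := by
  intro n
  induction n with
  | zero =>
    intro s x h hs hx
    rw [pvBLoop, if_neg (by omega)]
    rw [pvG, pv_sr_zero hx (by omega), Nat.xor_zero]
  | succ n ih =>
    intro s x h hs hx
    by_cases hlt : s < 32
    · rw [pvBLoop, if_pos ⟨hs, hlt⟩]
      rw [show x ^^^ x >>> s = pvG s x from rfl, pv_bloop_comm s (n + 1) (2 * s) x (by omega),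
        pv_g_g]
      rw [show s + s = 2 * s by omega]
      calc pvBLoop x (2 * s) ^^^ pvBLoop x (2 * s) >>> (2 * s)
          = pvG (2 * s) (pvBLoop x (2 * s)) := rfl
        _ = x := ih (2 * s) x (by omega) (by omega) hx
    · rw [pvBLoop, if_neg (by omega)]
      rw [pvG, pv_sr_zero hx (by omega), Nat.xor_zero]

-- ---------- A's loop inverts the tempering ----------

theorem pv_amask_lt {i s : Nat} (hi : i < 32) : pvAmask i s < 2 ^ (32 - i) := by
  have h2 : 0 < 2 ^ (32 - min (i + s) 32) := Nat.two_pow_pos _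
  have h3 : 2 ^ (32 - min (i + s) 32) ≤ 2 ^ (32 - i) := Nat.pow_le_pow_right (by norm_num) (by omega)
  unfold pvAmask
  omega

theorem pv_aloop_inv (s : Nat) (hs : 0 < s) : ∀ (n i x x0 : Nat), 32 - i ≤ n →
    x < 2 ^ 32 → x0 < 2 ^ 32 →
    x ^^^ x0 = (x &&& pvTopm i) >>> s →
    (pvG s (pvALoop s x i) = x0 ∧ pvALoop s x i < 2 ^ 32) := by
  have base : ∀ i x x0, 32 ≤ i → x < 2 ^ 32 → x0 < 2 ^ 32 →
      x ^^^ x0 = (x &&& pvTopm i) >>> s →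
      (pvG s (pvALoop s x i) = x0 ∧ pvALoop s x i < 2 ^ 32) := by
    intro i x x0 hi hx hx0 hyp
    rw [pvALoop, if_neg (by omega)]
    have ht : pvTopm i = 2 ^ 32 - 1 := by
      unfold pvTopm
      rw [show min i 32 = 32 by omega]
      norm_num
    rw [ht, Nat.and_two_pow_sub_one_of_lt_two_pow hx] at hyp
    refine ⟨?_, hx⟩
    rw [pvG, ← hyp, ← Nat.xor_assoc, Nat.xor_self, Nat.zero_xor]
  intro n
  induction n with
  | zero =>
    intro i x x0 hn hx hx0 hyp
    exact base i x x0 (by omega) hx hx0 hyp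
  | succ n ih =>
    intro i x x0 hn hx hx0 hyp
    by_cases hi : i < 32
    · rw [pvALoop, if_pos hi, if_neg (by omega)]
      set m := pvAmask i s with hm
      set d := (x &&& m) >>> s with hdd
      have hzx : x &&& m ≤ x := Nat.and_le_left
      have hzm : x &&& m < 2 ^ (32 - i) := lt_of_le_of_lt Nat.and_le_right (pv_amask_lt hi)
      have hd : d < 2 ^ (32 - min (i + s) 32) := by
        by_cases hc : i + s ≤ 32
        · have := pv_sr_lt hzm (by omega : s ≤ 32 - i)
          rw [show 32 - i - s = 32 - min (i + s) 32 by omega] at this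
          exact this
        · rw [hdd, pv_sr_zero hzm (by omega : 32 - i ≤ s),
            show 32 - min (i + s) 32 = 0 by omega]
          norm_num
      have hd32 : d < 2 ^ 32 :=
        lt_of_le_of_lt (le_trans (Nat.shiftRight_le _ _) hzx) hx
      have hx' : x ^^^ d < 2 ^ 32 := Nat.xor_lt_two_pow hx hd32
      have hyp' : (x ^^^ d) ^^^ x0 = ((x ^^^ d) &&& pvTopm (i + s)) >>> s := by
        have s1 : (x ^^^ d) ^^^ x0 = (x ^^^ x0) ^^^ d := by
          simp [Nat.xor_assoc, Nat.xor_left_comm, Nat.xor_comm]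
        have s2 : (x ^^^ x0) ^^^ d = ((x &&& pvTopm i) ^^^ (x &&& m)) >>> s := by
          rw [hyp, hdd, Nat.shiftRight_xor_distrib]
        have s3 : ((x &&& pvTopm i) ^^^ (x &&& m)) = x &&& pvTopm (i + s) := by
          rw [← Nat.and_xor_distrib_left, hm, pv_m1 hi]
        have s4 : (x ^^^ d) &&& pvTopm (i + s) = x &&& pvTopm (i + s) := by
          have hb : 32 - min (i + s) 32 ≤ 32 := by omega
          unfold pvTopm
          exact pv_disj_and hd hb
        rw [s1, s2, s3, s4]
      exact ih (i + s) (x ^^^ d) x0 (by omega) hx' hx0 hyp'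
    · exact base i x x0 (by omega) hx hx0 hyp
theorem pv_g_inj {s x y : Nat} (hs : 0 < s) (hx : x < 2 ^ 32) (hy : y < 2 ^ 32)
    (h : pvG s x = pvG s y) : x = y := by
  have hxy : x ^^^ y = (x ^^^ y) >>> s := by
    have e1 : pvG s x ^^^ (x >>> s) = x := by
      rw [pvG, Nat.xor_assoc, Nat.xor_self, Nat.xor_zero]
    have e2 : pvG s y ^^^ (y >>> s) = y := by
      rw [pvG, Nat.xor_assoc, Nat.xor_self, Nat.xor_zero]
    calc x ^^^ y = (pvG s x ^^^ (x >>> s)) ^^^ (pvG s y ^^^ (y >>> s)) := by rw [e1, e2]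
      _ = (pvG s x ^^^ pvG s y) ^^^ ((x >>> s) ^^^ (y >>> s)) := by
          simp [Nat.xor_assoc, Nat.xor_left_comm, Nat.xor_comm]
      _ = (x >>> s) ^^^ (y >>> s) := by rw [h, Nat.xor_self, Nat.zero_xor]
      _ = (x ^^^ y) >>> s := (Nat.shiftRight_xor_distrib).symm
  by_cases hz : x ^^^ y = 0
  · have := Nat.xor_eq_zero.mp hz
    exact this
  · exfalso
    have h1 : (x ^^^ y) >>> s < x ^^^ y := by
      rw [Nat.shiftRight_eq_div_pow]
      exact Nat.div_lt_self (Nat.pos_of_ne_zero hz) (Nat.one_lt_two_pow_iff.mpr (by omega))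
    omega

theorem pv_core {s x : Nat} (hs : 0 < s) (hx : x < 2 ^ 32) :
    pvALoop s x 0 = pvBLoop x s := by
  have h0 : x ^^^ x = (x &&& pvTopm 0) >>> s := by
    simp [pvTopm]
  have ha := pv_aloop_inv s hs 32 0 x x (by omega) hx hx h0
  exact pv_g_inj hs ha.2 (pv_bloop_lt 32 s x (by omega) hx) (ha.1.trans (pv_bloop_inv 32 s x (by omega) hs hx).symm)

-- ---------- pyRange structure for a general positive step ----------

theorem pv_pyRange_nil {a b s : Int} (hs : 0 < s) (hab : b ≤ a) :
    PySem.List.pyRange a b s = [] := by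
  rw [PySem.List.pyRange_of_pos a b hs, if_neg (by omega)]
  simp

theorem pv_pyRange_nil_neg {s : Int} (hs : s < 0) : PySem.List.pyRange 0 32 s = [] := by
  unfold PySem.List.pyRange
  rw [if_neg (by omega)]
  rw [if_neg (by omega), if_neg (by omega)]
  simp

theorem pv_pyRange_cons {a b s : Int} (hs : 0 < s) (hab : a < b) :
    PySem.List.pyRange a b s = a :: PySem.List.pyRange (a + s) b s := by
  rw [PySem.List.pyRange_of_pos a b hs, PySem.List.pyRange_of_pos (a + s) b hs,
    if_pos hab]
  have hc : ((b - a + s - 1) / s).toNat =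
      (if a + s < b then ((b - (a + s) + s - 1) / s).toNat else 0) + 1 := by
    by_cases h : a + s < b
    · rw [if_pos h]
      have e1 : b - a + s - 1 = (b - a - 1) + 1 * s := by ring
      have e2 : b - (a + s) + s - 1 = b - a - 1 - s + 1 * s := by ring
      rw [e1, e2, Int.add_mul_ediv_right _ _ (by omega : s ≠ 0),
        Int.add_mul_ediv_right _ _ (by omega : s ≠ 0)]
      have h3 : 0 ≤ (b - a - 1 - s) / s := Int.ediv_nonneg (by omega) (by omega)
      have h4 : b - a - 1 - s + s = b - a - 1 := by ring
      have h5 : (b - a - 1 - s + 1 * s) / s = (b - a - 1 - s) / s + 1 :=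
        Int.add_mul_ediv_right _ _ (by omega)
      have h6 : (b - a - 1) / s = (b - a - 1 - s) / s + 1 := by
        rw [← h5]; congr 1; ring
      rw [h6]
      omega
    · rw [if_neg h]
      have h1 : 1 ≤ (b - a + s - 1) / s := by
        rw [Int.le_ediv_iff_mul_le hs]; omega
      have h2 : (b - a + s - 1) / s < 2 := by
        rw [Int.ediv_lt_iff_lt_mul hs]; omega
      omega
  rw [hc, List.range_succ_eq_map]
  simp only [List.map_cons, List.map_map]
  congr 1
  · simp
  · apply List.map_congr_left
    intro k _
    simp [Function.comp]
    ring

-- ---------- the mask A builds and parses ----------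

theorem pv_parse0 (k : Nat) (a : Int) :
    (List.replicate k '0').foldl (fun a c => 2 * a + (if c = '1' then 1 else 0)) a
      = a * 2 ^ k := by
  induction k generalizing a with
  | zero => simp
  | succ n ih =>
    rw [List.replicate_succ, List.foldl_cons, ih]
    simp
    ring

theorem pv_parse1 (k : Nat) (a : Int) :
    (List.replicate k '1').foldl (fun a c => 2 * a + (if c = '1' then 1 else 0)) a
      = a * 2 ^ k + (2 ^ k - 1) := by
  induction k generalizing a with
  | zero => simp
  | succ n ih =>
    rw [List.replicate_succ, List.foldl_cons, ih]
    simp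
    ring

theorem pv_maskval (j st : Nat) (hj : j < 32) (hst : 1 ≤ st) :
    pvParseBin (PySem.List.slice
      (List.replicate ((j : Int)).toNat '0' ++ List.replicate ((st : Int)).toNat '1' ++
        List.replicate ((32 - (st : Int) - (j : Int))).toNat '0') none (some 32))
      = ((pvAmask j st : Nat) : Int) := by
  have e1 : ((j : Int)).toNat = j := by simp
  have e2 : ((st : Int)).toNat = st := by simp
  have e3 : ((32 - (st : Int) - (j : Int))).toNat = 32 - st - j := by omega
  rw [e1, e2, e3, PySem.List.slice_to _ (by norm_num : (0:Int) ≤ 32),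
    show ((32 : Int)).toNat = 32 from rfl]
  by_cases hc : j + st ≤ 32
  · have hlen : (List.replicate j '0' ++ List.replicate st '1' ++ List.replicate (32 - st - j) '0').length ≤ 32 := by
      simp
      omega
    rw [List.take_of_length_le hlen]
    unfold pvParseBin
    rw [List.foldl_append, List.foldl_append, pv_parse0, pv_parse1, pv_parse0]
    rw [pvAmask, show min (j + st) 32 = j + st by omega]
    have hple : (2:Nat) ^ (32 - (j + st)) ≤ 2 ^ (32 - j) := Nat.pow_le_pow_right (by norm_num) (by omega)
    push_cast [Nat.cast_sub hple]
    have hpow : (2:Int) ^ st * 2 ^ (32 - st - j) = 2 ^ (32 - j) := by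
      rw [← pow_add]; congr 1; omega
    have hpow2 : (32 - (j + st)) = 32 - st - j := by omega
    rw [hpow2]
    linear_combination hpow
  · have e4 : 32 - st - j = 0 := by omega
    rw [e4]
    simp only [List.replicate_zero, List.append_nil]
    rw [List.take_append, List.take_replicate, show min 32 j = j by omega,
      List.length_replicate, List.take_replicate, show min (32 - j) st = 32 - j by omega]
    unfold pvParseBin
    rw [List.foldl_append, pv_parse0, pv_parse1]
    rw [pvAmask, show min (j + st) 32 = 32 by omega]
    have hple : (2:Nat) ^ (32 - 32) ≤ 2 ^ (32 - j) := Nat.pow_le_pow_right (by norm_num) (by omega)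
    push_cast [Nat.cast_sub hple]
    norm_num

-- ---------- Int-level bridges ----------

theorem pv_bandneg (y m : Nat) :
    PySem.Int.band (Int.negSucc y) ((m : Nat) : Int) = ((m - (m &&& y) : Nat) : Int) := by
  unfold PySem.Int.band
  rw [if_neg (by omega), if_pos (by positivity)]
  have h1 : (-Int.negSucc y - 1).toNat = y := by simp [Int.negSucc_eq]
  have h2 : ((m : Int)).toNat = m := by simp
  rw [h1, h2]
theorem pv_bxorneg (y d : Nat) :
    PySem.Int.bxor (Int.negSucc y) ((d : Nat) : Int) = Int.negSucc (y ^^^ d) := by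
  unfold PySem.Int.bxor
  rw [if_neg (by omega), if_pos (by positivity)]
  have h1 : (-Int.negSucc y - 1).toNat = y := by simp [Int.negSucc_eq]
  have h2 : ((d : Int)).toNat = d := by simp
  rw [h1, h2, Int.negSucc_eq]
  ring
theorem pv_borneg (k b : Nat) :
    PySem.Int.bor (Int.negSucc k) ((b : Nat) : Int) = Int.negSucc (k - (k &&& b)) := by
  unfold PySem.Int.bor
  rw [if_neg (by omega), if_pos (by positivity)]
  have h1 : (-Int.negSucc k - 1).toNat = k := by simp [Int.negSucc_eq]
  have h2 : ((b : Int)).toNat = b := by simp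
  rw [h1, h2, Int.negSucc_eq]
  push_cast [Nat.cast_sub (Nat.and_le_left)]
  ring

/-- A's loop body (the port's lambda, lets zeta-reduced). -/
def pvStep (st : Int) (result i : Int) : Int :=
  PySem.Int.bxor result
    ((PySem.Int.band result
      (pvParseBin (PySem.List.slice
        (List.replicate i.toNat '0' ++ List.replicate st.toNat '1' ++
          List.replicate ((32 - st - i)).toNat '0') none (some 32)))) >>> st.toNat)

theorem pv_A_foldl (v s : Int) :
    right_unmix v s = (PySem.List.pyRange 0 32 s).foldl (pvStep s) v := rfl

theorem pv_step_pos (st : Nat) (hst : 1 ≤ st) (j x : Nat) (hj : j < 32) :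
    pvStep (st : Int) ((x : Nat) : Int) ((j : Nat) : Int)
      = ((x ^^^ ((x &&& pvAmask j st) >>> st) : Nat) : Int) := by
  unfold pvStep
  rw [pv_maskval j st hj hst, PySem.Int.band_natCast,
    show ((st : Int)).toNat = st by simp, ← Int.natCast_shiftRight, PySem.Int.bxor_natCast]

theorem pv_step_neg (st : Nat) (hst : 1 ≤ st) (j y : Nat) (hj : j < 32) :
    pvStep (st : Int) (Int.negSucc y) ((j : Nat) : Int)
      = Int.negSucc (y ^^^ (((y ^^^ (2 ^ 32 - 1)) &&& pvAmask j st) >>> st)) := by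
  unfold pvStep
  have hmlt : pvAmask j st < 2 ^ 32 :=
    lt_of_lt_of_le (pv_amask_lt hj) (Nat.pow_le_pow_right (by norm_num) (by omega))
  rw [pv_maskval j st hj hst, pv_bandneg, pv_ldiffxor hmlt,
    show ((st : Int)).toNat = st by simp, ← Int.natCast_shiftRight, pv_bxorneg,
    Nat.and_comm]

theorem pv_bridgeA_pos (st : Nat) (hst : 1 ≤ st) : ∀ (n j x : Nat), x < 2 ^ 32 → 32 - j ≤ n →
    (PySem.List.pyRange ((j : Nat) : Int) 32 ((st : Nat) : Int)).foldl (pvStep (st : Int)) ((x : Nat) : Int)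
      = ((pvALoop st x j : Nat) : Int) := by
  intro n
  induction n with
  | zero =>
    intro j x hx hn
    rw [pv_pyRange_nil (by exact_mod_cast hst) (by exact_mod_cast (by omega : 32 ≤ j)),
      List.foldl_nil, pvALoop, if_neg (by omega)]
  | succ n ih =>
    intro j x hx hn
    by_cases hj : j < 32
    · rw [pv_pyRange_cons (by exact_mod_cast hst) (by exact_mod_cast hj), List.foldl_cons,
        pv_step_pos st hst j x hj, show ((j : Int) + (st : Int)) = ((j + st : Nat) : Int) by push_cast; ring]
      have hd32 : (x &&& pvAmask j st) >>> st < 2 ^ 32 :=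
        lt_of_le_of_lt (le_trans (Nat.shiftRight_le _ _) Nat.and_le_left) hx
      rw [ih (j + st) (x ^^^ (x &&& pvAmask j st) >>> st) (Nat.xor_lt_two_pow hx hd32) (by omega)]
      conv_rhs => rw [pvALoop, if_pos hj, if_neg (by omega)]
    · rw [pv_pyRange_nil (by exact_mod_cast hst) (by exact_mod_cast (by omega : 32 ≤ j)),
        List.foldl_nil, pvALoop, if_neg (by omega)]

theorem pv_bridgeA_neg (st : Nat) (hst : 1 ≤ st) : ∀ (n j y : Nat), y < 2 ^ 32 → 32 - j ≤ n →
    (PySem.List.pyRange ((j : Nat) : Int) 32 ((st : Nat) : Int)).foldl (pvStep (st : Int)) (Int.negSucc y)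
      = Int.negSucc (pvALoop st (y ^^^ (2 ^ 32 - 1)) j ^^^ (2 ^ 32 - 1)) := by
  intro n
  induction n with
  | zero =>
    intro j y hy hn
    rw [pv_pyRange_nil (by exact_mod_cast hst) (by exact_mod_cast (by omega : 32 ≤ j)),
      List.foldl_nil, pvALoop, if_neg (by omega), Nat.xor_xor_cancel_right]
  | succ n ih =>
    intro j y hy hn
    by_cases hj : j < 32
    · rw [pv_pyRange_cons (by exact_mod_cast hst) (by exact_mod_cast hj), List.foldl_cons,
        pv_step_neg st hst j y hj, show ((j : Int) + (st : Int)) = ((j + st : Nat) : Int) by push_cast; ring]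
      set r := y ^^^ (2 ^ 32 - 1) with hr
      set d := (r &&& pvAmask j st) >>> st with hd
      have hd32 : d < 2 ^ 32 := by
        have hmlt : pvAmask j st < 2 ^ 32 :=
          lt_of_lt_of_le (pv_amask_lt hj) (Nat.pow_le_pow_right (by norm_num) (by omega))
        exact lt_of_le_of_lt (le_trans (Nat.shiftRight_le _ _) Nat.and_le_right) hmlt
      have hy' : y ^^^ d < 2 ^ 32 := Nat.xor_lt_two_pow hy hd32
      rw [ih (j + st) (y ^^^ d) hy' (by omega)]
      have hconj : (y ^^^ d) ^^^ (2 ^ 32 - 1) = r ^^^ d := by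
        rw [hr]
        simp [Nat.xor_assoc, Nat.xor_left_comm, Nat.xor_comm]
      rw [hconj]
      conv_rhs => rw [pvALoop, if_pos hj, if_neg (by omega)]
    · rw [pv_pyRange_nil (by exact_mod_cast hst) (by exact_mod_cast (by omega : 32 ≤ j)),
        List.foldl_nil, pvALoop, if_neg (by omega), Nat.xor_xor_cancel_right]

theorem pv_bridgeB_aux : ∀ (n : Nat) (x : Nat) (s : Int), 0 < s → (32 - s).toNat ≤ n →
    pvAltLoop ((x : Nat) : Int) s = ((pvBLoop x s.toNat : Nat) : Int) := by
  intro n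
  induction n with
  | zero =>
    intro x s hs hn
    rw [pvAltLoop, dif_neg (by omega), pvBLoop, if_neg (by omega)]
  | succ n ih =>
    intro x s hs hn
    by_cases hg : s < 32
    · rw [pvAltLoop, dif_pos ⟨hs, hg⟩, ← Int.natCast_shiftRight, PySem.Int.bxor_natCast,
        ih (x ^^^ x >>> s.toNat) (s * 2) (by omega) (by omega),
        show (s * 2).toNat = 2 * s.toNat by omega]
      conv_rhs => rw [pvBLoop, if_pos (show 0 < s.toNat ∧ s.toNat < 32 by omega)]
    · rw [pvAltLoop, dif_neg (by omega), pvBLoop, if_neg (by omega)]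

theorem pv_rec_id (v : Int) (h1 : -2147483648 ≤ v) (h2 : v ≤ 2147483648) :
    PySem.Int.bor ((v >>> (32:Nat)) <<< (32:Nat)) (PySem.Int.band v 4294967295) = v := by
  have hM : (4294967295 : Int) = ((4294967295 : Nat) : Int) := by norm_num
  have hMpow : (4294967295 : Nat) = 2 ^ 32 - 1 := by norm_num
  cases v with
  | ofNat u =>
    rw [Int.ofNat_eq_natCast] at *
    have hu : u < 2 ^ 32 := by omega
    rw [hM, PySem.Int.band_natCast, hMpow, Nat.and_two_pow_sub_one_of_lt_two_pow hu,
      ← Int.natCast_shiftRight, pv_sr_zero hu (by omega)]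
    simp only [Nat.cast_zero, Int.zero_shiftLeft]
    rw [show (0 : Int) = ((0 : Nat) : Int) by norm_num, PySem.Int.bor_natCast, Nat.zero_or]
  | negSucc n =>
    have hn : n < 2 ^ 32 := by
      rw [Int.negSucc_eq] at h1
      omega
    have hz : n ^^^ (2 ^ 32 - 1) < 2 ^ 32 := Nat.xor_lt_two_pow hn (by norm_num)
    rw [hM, pv_bandneg, hMpow, pv_ldiffxor (by norm_num : (2:Nat) ^ 32 - 1 < 2 ^ 32)]
    rw [Nat.and_comm, Nat.and_two_pow_sub_one_of_lt_two_pow hz]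
    rw [Int.negSucc_shiftRight, pv_sr_zero hn (by omega)]
    rw [show Int.negSucc 0 <<< (32:Nat) = Int.negSucc 4294967295 by decide]
    rw [pv_borneg]
    rw [hMpow, Nat.and_comm, Nat.and_two_pow_sub_one_of_lt_two_pow hz,
      pv_subxor (by rw [Nat.and_comm]; exact Nat.and_two_pow_sub_one_of_lt_two_pow hz)]
    rw [Nat.xor_comm n, ← Nat.xor_assoc, Nat.xor_self, Nat.zero_xor]

-- ===== VERDICT (by name: the statement is the Claim_ definition above) =====
theorem pv_B_shape (v s : Int) :
    right_unmix_alt v s =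
      PySem.Int.bor ((v >>> (32:Nat)) <<< (32:Nat)) (pvAltLoop (PySem.Int.band v 4294967295) s) := rfl

theorem right_unmix_spec : Claim_equal_right_unmix := by
  unfold Claim_equal_right_unmix Spec_right_unmix Pre_right_unmix
  intro v s hdom hpre
  have hdom' : (-2147483648 ≤ v ∧ v ≤ 2147483648) ∧ (-2147483648 ≤ s ∧ s ≤ 2147483648) := by
    unfold Dom_right_unmix pvDomInt at hdom
    simpa using hdom
  obtain ⟨⟨hv1, hv2⟩, _, _⟩ := hdom'
  rcases lt_trichotomy s 0 with hneg | rfl | hpos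
  · -- negative shift: Python's loop body never runs; B's loop never runs either
    rw [pv_A_foldl, pv_pyRange_nil_neg hneg, List.foldl_nil, pv_B_shape,
      pvAltLoop, dif_neg (by omega), (pv_rec_id v hv1 hv2)]
  · exact absurd rfl hpre
  · have hseq : ((s.toNat : Nat) : Int) = s := Int.toNat_of_nonneg hpos.le
    set st := s.toNat with hst
    have hst1 : 1 ≤ st := by omega
    cases v with
    | ofNat u =>
      rw [Int.ofNat_eq_natCast] at *
      have hu : u < 2 ^ 32 := by omega
      have hA : right_unmix ((u : Nat) : Int) s = ((pvALoop st u 0 : Nat) : Int) := by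
        rw [pv_A_foldl, ← hseq, show (0 : Int) = ((0 : Nat) : Int) by norm_num]
        exact pv_bridgeA_pos st hst1 32 0 u hu (by omega)
      have hB : right_unmix_alt ((u : Nat) : Int) s = ((pvBLoop u st : Nat) : Int) := by
        rw [pv_B_shape, show (4294967295 : Int) = ((4294967295 : Nat) : Int) by norm_num,
          PySem.Int.band_natCast, show (4294967295 : Nat) = 2 ^ 32 - 1 by norm_num,
          Nat.and_two_pow_sub_one_of_lt_two_pow hu,
          pv_bridgeB_aux 32 u s hpos (by omega),
          ← Int.natCast_shiftRight, pv_sr_zero hu (by omega)]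
        simp only [Nat.cast_zero, Int.zero_shiftLeft]
        rw [show (0 : Int) = ((0 : Nat) : Int) by norm_num, PySem.Int.bor_natCast, Nat.zero_or]
      rw [hA, hB, pv_core (by omega) hu]
    | negSucc n =>
      have hn : n < 2 ^ 32 := by
        rw [Int.negSucc_eq] at hv1
        omega
      have hr : n ^^^ (2 ^ 32 - 1) < 2 ^ 32 := Nat.xor_lt_two_pow hn (by norm_num)
      have hA : right_unmix (Int.negSucc n) s
          = Int.negSucc (pvALoop st (n ^^^ (2 ^ 32 - 1)) 0 ^^^ (2 ^ 32 - 1)) := by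
        rw [pv_A_foldl, ← hseq, show (0 : Int) = ((0 : Nat) : Int) by norm_num]
        exact pv_bridgeA_neg st hst1 32 0 n hn (by omega)
      have hblt : pvBLoop (n ^^^ (2 ^ 32 - 1)) st < 2 ^ 32 := pv_bloop_lt 32 st _ (by omega) hr
      have hB : right_unmix_alt (Int.negSucc n) s
          = Int.negSucc ((2 ^ 32 - 1) ^^^ pvBLoop (n ^^^ (2 ^ 32 - 1)) st) := by
        rw [pv_B_shape, show (4294967295 : Int) = ((4294967295 : Nat) : Int) by norm_num,
          pv_bandneg, show (4294967295 : Nat) = 2 ^ 32 - 1 by norm_num,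
          pv_ldiffxor (by norm_num : (2:Nat) ^ 32 - 1 < 2 ^ 32),
          Nat.and_comm, Nat.and_two_pow_sub_one_of_lt_two_pow hr,
          pv_bridgeB_aux 32 _ s hpos (by omega),
          Int.negSucc_shiftRight, pv_sr_zero hn (by omega),
          show Int.negSucc 0 <<< (32:Nat) = Int.negSucc 4294967295 by decide,
          pv_borneg, show (4294967295 : Nat) = 2 ^ 32 - 1 by norm_num,
          Nat.and_comm, Nat.and_two_pow_sub_one_of_lt_two_pow hblt,
          pv_subxor (by rw [Nat.and_comm]; exact Nat.and_two_pow_sub_one_of_lt_two_pow hblt)]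
      rw [hA, hB, pv_core (by omega) hr, Nat.xor_comm]
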